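-- pv_equiv track=rewrite | github.com/Santi2065/Vigenere-Cipher | LEGAJO1_LEGAJO2_tp2_p3.py | separador
-- ===== SOURCE A (Python) =====
-- def separador(largo_clave: int,text: list) ->list:
--     """
--     La funcion separador recibe dos argumentos que permite separar un texto en
--     una lista con sublistas dentro. Cada sublista agrupa una serie de letras
--     en ese 'N' lugar y luego avanza a la proxima posicion salteando de a 'N' espacios.
--     ------------------------------------------------------------------------------
--     input :
--         largo_clave -> 'N' Frecuencia de avance entre letra y letra
--         text -> Texto a separar
--     ------------------------------------------------------------------------------
--     output :
--         text_separado -> Lista con sublistas de letras.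
--     """
--     text_separado = [] # Creamos una lista vacia que va a agrupar a las sublistas.
--     for n_lista in range(largo_clave): # Iteramos solo la cantidad de 'N' ingresadas por el usuario.
--         sublista = [] # Lista auxiliar que permite almacenar los valores requeridos del texto.
--         for index in range(n_lista, len(text), largo_clave): # Iterador por cada 'N'.
--             sublista.append(text[index]) # Se agrega la letra en el lugar 'N' a una sublista y se avanzan otros 'N' espacios.
--         text_separado.append(sublista) # Se inserta la sublista completa, y se pasa al siguiente 'N'
--     return text_separado
-- ===== SOURCE B (Python) =====
-- def separador(largo_clave: int, text: list) -> list: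
--     # One pass: pre-allocate the buckets, then distribute each element by index modulo.
--     buckets = [[] for _ in range(largo_clave)]
--     for i, ch in enumerate(text):
--         if buckets:
--             buckets[i % len(buckets)].append(ch)
--     return buckets
-- ===== Notes on version B (the rewrite author's own statement) =====
-- stated objective: idiomatic
-- what changed: B makes one enumerate pass distributing each element into a pre-allocated bucket by index modulo, instead of A's k strided scans over the text (one per column).
import Mathlib
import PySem

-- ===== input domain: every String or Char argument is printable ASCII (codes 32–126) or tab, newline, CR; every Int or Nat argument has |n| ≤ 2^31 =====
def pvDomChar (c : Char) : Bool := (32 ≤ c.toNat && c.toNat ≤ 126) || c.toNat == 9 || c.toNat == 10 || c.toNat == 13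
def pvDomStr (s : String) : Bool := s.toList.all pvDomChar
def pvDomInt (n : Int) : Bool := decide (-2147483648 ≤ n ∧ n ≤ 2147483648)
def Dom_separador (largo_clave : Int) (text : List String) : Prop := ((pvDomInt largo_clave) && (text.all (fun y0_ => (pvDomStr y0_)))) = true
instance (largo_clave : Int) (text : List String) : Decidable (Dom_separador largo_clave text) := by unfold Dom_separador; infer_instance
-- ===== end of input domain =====

-- B replaces A's k strided scans (one per column) by a single enumerate pass that
-- distributes each element into a pre-allocated bucket by index modulo (idiomatic, same cost).


-- ===== PORT A =====
-- text[index]: ported as pyGetD with default "" — exact here, since every generated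
-- index satisfies 0 ≤ index < len(text), so the default is never reached.
def separador (largo_clave : Int) (text : List String) : List (List String) :=
  (PySem.List.pyRange 0 largo_clave 1).foldl
    (fun text_separado n_lista =>
      text_separado ++
        [(PySem.List.pyRange n_lista (text.length : Int) largo_clave).foldl
          (fun sublista index => sublista ++ [PySem.List.pyGetD text index ""]) []])
    []

-- ===== PORT B =====
-- one loop step of B: `if buckets: buckets[i % len(buckets)].append(ch)`
def sepAltStep (bs : List (List String)) (p : Int × String) : List (List String) :=
  if bs.isEmpty then bs
  else bs.set (PySem.Int.mod p.1 (bs.length : Int)).toNat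
         ((bs.getD (PySem.Int.mod p.1 (bs.length : Int)).toNat []) ++ [p.2])

def separador_alt (largo_clave : Int) (text : List String) : List (List String) :=
  (PySem.List.enumerate text 0).foldl sepAltStep
    (List.replicate largo_clave.toNat [])

-- ===== PRECONDITION & SPEC =====
def Spec_separador (largo_clave : Int) (text : List String) (out : List (List String)) : Prop := out = separador_alt largo_clave text
instance (largo_clave : Int) (text : List String) (out : List (List String)) : Decidable (Spec_separador largo_clave text out) := by unfold Spec_separador; infer_instance

-- ===== CLAIM (what is proved, stated in full; the proofs are below) =====
def Claim_equal_separador : Prop := ∀ (largo_clave : Int) (text : List String), Dom_separador largo_clave text → Spec_separador largo_clave text (separador largo_clave text)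

-- ===== LEMMAS AND PROOFS =====

-- number of indices generated by range(j, L, k)
def colCnt (j k L : Nat) : Nat := if j < L then (L - j + k - 1) / k else 0

theorem pyRange_step_eq (j k L : Nat) (hk : 0 < k) :
    PySem.List.pyRange (j : Int) (L : Int) (k : Int) =
      (List.range (colCnt j k L)).map (fun i : Nat => ((j : Int) + (k : Int) * (i : Int))) := by
  rw [PySem.List.pyRange_of_pos _ _ (by exact_mod_cast hk)]
  unfold colCnt
  by_cases h : j < L
  · rw [if_pos (by exact_mod_cast h), if_pos h]
    have h1 : ((L : Int) - (j : Int) + (k : Int) - 1) = ((L - j + k - 1 : Nat) : Int) := by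
      omega
    rw [h1, ← Int.natCast_div, Int.toNat_natCast]
  · rw [if_neg (by exact_mod_cast h), if_neg h]

theorem dvd_sub_iff_mod (j k L : Nat) (hj : j < k) (hjL : j ≤ L) :
    k ∣ L - j ↔ L % k = j := by
  rw [← Nat.modEq_iff_dvd' hjL, Nat.ModEq, Nat.mod_eq_of_lt hj, eq_comm]

theorem colCnt_succ (j k L : Nat) (hj : j < k) :
    colCnt j k (L + 1) = colCnt j k L + (if L % k = j then 1 else 0) := by
  have hk : 0 < k := Nat.lt_of_le_of_lt (Nat.zero_le j) hj
  unfold colCnt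
  by_cases hL : j < L
  · rw [if_pos (by omega), if_pos hL]
    have hnum : L + 1 - j + k - 1 = (L - j + k - 1) + 1 := by omega
    rw [hnum, Nat.succ_div]
    have hd : (L - j + k - 1) + 1 = L - j + k := by omega
    have hdvd : (k ∣ L - j + k) ↔ (L % k = j) := by
      rw [Nat.dvd_add_self_right, dvd_sub_iff_mod j k L hj (le_of_lt hL)]
    rw [hd]
    by_cases hmod : L % k = j
    · rw [if_pos (hdvd.mpr hmod), if_pos hmod]
    · rw [if_neg (fun hc => hmod (hdvd.mp hc)), if_neg hmod]
  · by_cases hE : j = L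
    · subst hE
      rw [if_pos (by omega), if_neg hL]
      have h2 : j + 1 - j + k - 1 = k := by omega
      rw [h2, Nat.div_self hk]
      have h3 : j % k = j := Nat.mod_eq_of_lt hj
      rw [if_pos h3]
    · rw [if_neg (by omega), if_neg hL]
      have h5 : L % k = L := Nat.mod_eq_of_lt (by omega)
      have h4 : ¬ (L % k = j) := by omega
      rw [if_neg h4]

theorem colCnt_last (j k L : Nat) (hj : j < k) (h : L % k = j) :
    (j : Int) + (k : Int) * (colCnt j k L : Int) = (L : Int) := by
  have hk : 0 < k := Nat.lt_of_le_of_lt (Nat.zero_le j) hj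
  have hjL : j ≤ L := by have := Nat.mod_le L k; omega
  unfold colCnt
  by_cases hL : j < L
  · rw [if_pos hL]
    obtain ⟨q, hq⟩ := (dvd_sub_iff_mod j k L hj hjL).mpr h
    have hnum : L - j + k - 1 = k * q + (k - 1) := by omega
    rw [hnum, Nat.mul_add_div hk, Nat.div_eq_of_lt (by omega), Nat.add_zero]
    have hfin : j + k * q = L := by omega
    exact_mod_cast hfin
  · have hE : j = L := by omega
    subst hE
    rw [if_neg hL]
    simp

theorem pyRange_step_snoc (j k L : Nat) (hj : j < k) :
    PySem.List.pyRange (j : Int) ((L : Int) + 1) (k : Int) =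
      PySem.List.pyRange (j : Int) (L : Int) (k : Int) ++
        (if L % k = j then [(L : Int)] else []) := by
  have hk : 0 < k := Nat.lt_of_le_of_lt (Nat.zero_le j) hj
  have h1 : ((L : Int) + 1) = ((L + 1 : Nat) : Int) := by omega
  rw [h1, pyRange_step_eq j k (L + 1) hk, pyRange_step_eq j k L hk, colCnt_succ j k L hj]
  by_cases h : L % k = j
  · rw [if_pos h, if_pos h, List.range_succ, List.map_append]
    congr 1
    simp [colCnt_last j k L hj h]
  · rw [if_neg h, if_neg h, Nat.add_zero, List.append_nil]

theorem separador_eq_map (lc : Int) (t : List String) :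
    separador lc t = (PySem.List.pyRange 0 lc 1).map
      (fun n => (PySem.List.pyRange n (t.length : Int) lc).map
        (fun i => PySem.List.pyGetD t i "")) := by
  unfold separador
  rw [PySem.List.foldl_append_singleton_eq_map
        (fun n_lista => (PySem.List.pyRange n_lista (t.length : Int) lc).foldl
          (fun sublista index => sublista ++ [PySem.List.pyGetD t index ""]) [])]
  simp only [List.nil_append]
  apply List.map_congr_left
  intro n _
  rw [PySem.List.foldl_append_singleton_eq_map (fun index => PySem.List.pyGetD t index "")]
  simp

theorem length_separador (k : Nat) (t : List String) :
    (separador (k : Int) t).length = k := by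
  rw [separador_eq_map, List.length_map, PySem.List.length_pyRange_one]
  simp

theorem sepAltStep_nil_fold (l : List (Int × String)) :
    l.foldl sepAltStep [] = [] := by
  induction l with
  | nil => rfl
  | cons p l ih => simpa [sepAltStep] using ih

theorem key_eq (k : Nat) (hk : 0 < k) (t : List String) :
    separador_alt (k : Int) t = separador (k : Int) t := by
  induction t using List.reverseRecOn with
  | nil =>
    unfold separador_alt
    rw [PySem.List.enumerate_nil, List.foldl_nil, Int.toNat_natCast, separador_eq_map]
    symm
    rw [List.eq_replicate_iff]
    constructor
    · rw [List.length_map, PySem.List.length_pyRange_one]; simp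
    · intro b hb
      rw [List.mem_map] at hb
      obtain ⟨n, hn, hb⟩ := hb
      rw [PySem.List.mem_pyRange_one] at hn
      rw [← hb]
      have : PySem.List.pyRange n ((List.length ([] : List String) : Nat) : Int) (k : Int) = [] := by
        rw [PySem.List.pyRange_of_pos _ _ (by exact_mod_cast hk)]
        rw [if_neg (by simp; omega)]
        simp
      simp only [this, List.map_nil]
  | append_singleton t x ih =>
    have hL : (t ++ [x]).length = t.length + 1 := by simp
    set L := t.length with hLdef
    -- LHS: one more step of the fold
    unfold separador_alt at ih ⊢
    rw [PySem.List.enumerate_append, List.foldl_append, ih]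
    have hx : PySem.List.enumerate [x] (0 + (L : Int)) = [((L : Int), x)] := by
      simp [PySem.List.enumerate_cons, PySem.List.enumerate_nil]
    rw [hx, List.foldl_cons, List.foldl_nil]
    -- the step applied to `separador k t`
    have hlen : (separador (k : Int) t).length = k := length_separador k t
    have hne : (separador (k : Int) t).isEmpty = false := by
      rw [List.isEmpty_eq_false_iff, ← List.length_pos_iff, hlen]; exact hk
    set m : Nat := L % k with hm
    have hmk : m < k := Nat.mod_lt _ hk
    have hmod : (PySem.Int.mod (L : Int) ((separador (k : Int) t).length : Int)).toNat = m := by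
      rw [hlen, PySem.Int.mod_natCast, Int.toNat_natCast]
    rw [sepAltStep]
    simp only [hne, Bool.false_eq_true, if_false, hmod]
    -- now prove the list equality index by index
    rw [separador_eq_map ((k : Int)) (t ++ [x]), separador_eq_map ((k : Int)) t]
    apply List.ext_getElem
    · simp [PySem.List.length_pyRange_one]
    · intro i hi1 hi2
      have hik : i < k := by
        have := hi1
        simp [PySem.List.length_pyRange_one] at this
        omega
      have hrlen : i < (PySem.List.pyRange 0 (k : Int) 1).length := by
        rw [PySem.List.length_pyRange_one]; simpa using hik
      have hri : (PySem.List.pyRange 0 (k : Int) 1)[i] = (i : Int) := by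
        rw [PySem.List.getElem_pyRange_one]; simp
      -- the common column over t, with indices below L, reads t, not t ++ [x]
      have hcol : ∀ (n : Int), 0 ≤ n →
          (PySem.List.pyRange n (L : Int) (k : Int)).map
              (fun idx => PySem.List.pyGetD (t ++ [x]) idx "") =
            (PySem.List.pyRange n (L : Int) (k : Int)).map
              (fun idx => PySem.List.pyGetD t idx "") := by
        intro n hn
        apply List.map_congr_left
        intro idx hidx
        rw [PySem.List.mem_pyRange_iff_of_pos (by exact_mod_cast hk)] at hidx
        obtain ⟨h1, h2, _⟩ := hidx
        have h0 : 0 ≤ idx := le_trans hn h1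
        rw [PySem.List.pyGetD_eq_getElem _ _ h0
              (by simp only [List.length_append, List.length_singleton]; omega),
            PySem.List.pyGetD_eq_getElem _ _ h0 (by omega)]
        rw [List.getElem_append_left (by omega)]
      have hxval : PySem.List.pyGetD (t ++ [x]) (L : Int) "" = x := by
        rw [PySem.List.pyGetD_eq_getElem _ _ (by omega)
              (by simp only [List.length_append, List.length_singleton]; omega)]
        simp [hLdef]
      rw [List.getElem_map, hri, List.getElem_set]
      have hsplit : PySem.List.pyRange (i : Int) (((t ++ [x]).length : Nat) : Int) (k : Int) =
          PySem.List.pyRange (i : Int) (L : Int) (k : Int) ++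
            (if L % k = i then [(L : Int)] else []) := by
        rw [hL]
        have : (((L + 1 : Nat) : Nat) : Int) = (L : Int) + 1 := by omega
        rw [this, pyRange_step_snoc i k L hik]
      rw [hsplit, List.map_append, hcol (i : Int) (by omega)]
      by_cases hcase : m = i
      · rw [if_pos hcase]
        have hgd : ((PySem.List.pyRange 0 (k : Int) 1).map
            (fun n => (PySem.List.pyRange n (L : Int) (k : Int)).map
              (fun idx => PySem.List.pyGetD t idx ""))).getD m [] =
            (PySem.List.pyRange (m : Int) (L : Int) (k : Int)).map
              (fun idx => PySem.List.pyGetD t idx "") := by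
          rw [List.getD_eq_getElem _ _ (by rw [List.length_map, PySem.List.length_pyRange_one]; simpa using hmk)]
          rw [List.getElem_map, PySem.List.getElem_pyRange_one]
          simp
        rw [hgd, if_pos (by omega)]
        simp [hxval, hcase]
      · rw [if_neg hcase, if_neg (by omega)]
        rw [List.getElem_map, hri]
        simp [hLdef]

-- ===== VERDICT (by name: the statement is the Claim_ definition above) =====
theorem separador_spec : Claim_equal_separador := by
  intro lc t _
  unfold Spec_separador
  by_cases h : 0 < lc
  · have hlc : lc = ((lc.toNat : Nat) : Int) := by omega
    rw [hlc]
    exact (key_eq lc.toNat (by omega) t).symm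
  · unfold separador separador_alt
    rw [PySem.List.pyRange_one_eq_nil (by omega), List.foldl_nil]
    have : lc.toNat = 0 := by omega
    rw [this, List.replicate_zero]
    exact (sepAltStep_nil_fold _).symm
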